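-- pv_equiv track=rewrite | github.com/ycchiu0703/CFGE2BA | Generate_ACFGs.py | handle_ins
-- ===== SOURCE A (Python) =====
-- def in_ins_list(instruction, ins_list):
--     """
--     判断当前指令是否在指令列表中
--     :param instruction:
--     :param ins_list:
--     :return:
--     """
--     instruction = instruction.split( )
--     opcode = instruction[0].lower()
--     # for ins in ins_list:
--     #     if ins in opcode:
--     #         return True
--     # return False
--     if opcode in ins_list:
--         return True
--     return False
--
-- def handle_ins(insns):
--     """
--     统计基本块中指令类型的数量
--     :param insns:
--     :return:
--     """
--     # transfer_ins = ['MOV', 'PUSH', 'POP', 'XCHG', 'IN', 'OUT', 'XLAT', 'LEA', 'LDS', 'LES', 'LAHF', 'SAHF', 'PUSHF', 'POPF']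
--     # arithmetic_ins = ['ADD', 'SUB', 'MUL', 'DIV', 'XOR', 'INC', 'DEC', 'IMUL', 'IDIV', 'OR', 'NOT', 'SLL', 'SRL', 'SAR', 'SAL', 'ADC', 'CMP', 'NEG', 'SBB']
--
--     transfer_ins = ['mov', 'movabs', 'push', 'xchg', 'in', 'out', 'xlat', 'pop', 'lb', 'lbu', 'lh', 'lw', 'sb', 'sh', 'sw', 'ldc', 'les', 'lea', 'lahf', 'sahf', 'pushf', 'popf',
--     'lds', 'restore', 'lswi', 'sts', 'usp', 'srs', 'pea', 'lui', 'lhu', 'rdcycle', 'rdtime', 'rdinstret']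
--     arithmetic_ins = ['add', 'sub', 'inc', 'xor', 'sar', 'addi', 'addiu', 'addu', 'and', 'ldr', 'andi', 'nor', 'or', 'ori', 'subu', 'xori', 'div', 'divu', 'mfhi', 'mflo', 'mthi', 'mtlo',
--     'mult', 'multu', 'sll', 'sllv', 'sra', 'srav', 'srl', 'srlv', 'bic', 'xnor', 'not', 'eor', 'asr', 'fabs', 'abs', 'mac', 'neg', 'cmp', 'test', 'slti', 'slt', 'sltu', 'sltui',
--     'sltiu', 'cmn', 'fcmp', 'dcbi', 'tas', 'btst', 'cbw', 'cwde', 'cdqe', 'cdq', 'slli', 'srli', 'srai', 'auipc', 'adc', 'sbb', 'mul', 'dec', 'imul', 'idiv', 'sal']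
--     calls_ins = ['CALL']
--     ctl = ['jmp', 'jz', 'jnz', 'je', 'jne', 'call', 'jr', 'beq', 'bge', 'bgeu', 'bgez', 'bgezal', 'bgtz', 'blez', 'blt', 'bltu', 'bltz', 'bltzal', 'bne', 'break', 'j', 'jal',
--     'jalr', 'mfc0', 'mtc0', 'syscall', 'leave', 'hvc', 'svc', 'hlt', 'arpl', 'sys', 'ti', 'trap', 'ret', 'retn', 'bl', 'bicc', 'bclr', 'bsrf', 'rte', 'wait', 'fwait', 'wfe',
--     'ecall', 'ebreak', 'jb', 'jbe']
--
--     no_transfer = 0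
--     no_arithmetic = 0
--     no_calls = 0
--     for ins in insns:
--         ins_name = ins[1]
--         if in_ins_list(ins_name, transfer_ins):
--             no_transfer = no_transfer + 1
--         if in_ins_list(ins_name, arithmetic_ins):
--             no_arithmetic = no_arithmetic + 1
--         if in_ins_list(ins_name, calls_ins):
--             no_calls = no_calls + 1
--     return no_transfer, no_calls, no_arithmetic
-- ===== SOURCE B (Python) =====
-- _TRANSFER = ['mov', 'movabs', 'push', 'xchg', 'in', 'out', 'xlat', 'pop', 'lb', 'lbu', 'lh', 'lw', 'sb', 'sh', 'sw', 'ldc', 'les', 'lea', 'lahf', 'sahf', 'pushf', 'popf',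
--     'lds', 'restore', 'lswi', 'sts', 'usp', 'srs', 'pea', 'lui', 'lhu', 'rdcycle', 'rdtime', 'rdinstret']
-- _ARITH = ['add', 'sub', 'inc', 'xor', 'sar', 'addi', 'addiu', 'addu', 'and', 'ldr', 'andi', 'nor', 'or', 'ori', 'subu', 'xori', 'div', 'divu', 'mfhi', 'mflo', 'mthi', 'mtlo',
--     'mult', 'multu', 'sll', 'sllv', 'sra', 'srav', 'srl', 'srlv', 'bic', 'xnor', 'not', 'eor', 'asr', 'fabs', 'abs', 'mac', 'neg', 'cmp', 'test', 'slti', 'slt', 'sltu', 'sltui',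
--     'sltiu', 'cmn', 'fcmp', 'dcbi', 'tas', 'btst', 'cbw', 'cwde', 'cdqe', 'cdq', 'slli', 'srli', 'srai', 'auipc', 'adc', 'sbb', 'mul', 'dec', 'imul', 'idiv', 'sal']
--
-- def handle_ins(insns):
--     # Stage 1: build a frequency histogram of the (lowered) opcodes.
--     freq = {}
--     for ins in insns:
--         op = ins[1].split()[0].lower()
--         freq[op] = freq.get(op, 0) + 1
--     # Stage 2: sum the histogram over each keyword vocabulary (each list is duplicate-free).
--     no_transfer = sum(freq.get(op, 0) for op in _TRANSFER)
--     no_arithmetic = sum(freq.get(op, 0) for op in _ARITH)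
--     no_calls = freq.get('CALL', 0)
--     return no_transfer, no_calls, no_arithmetic
-- ===== Notes on version B (the rewrite author's own statement) =====
-- stated objective: alternative
-- what changed: Replaces A's per-instruction triple classification (three list-membership tests per instruction) by a two-stage algorithm: one pass builds an opcode frequency histogram, then each counter is obtained by summing that histogram over the corresponding duplicate-free keyword vocabulary.
import Mathlib
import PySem

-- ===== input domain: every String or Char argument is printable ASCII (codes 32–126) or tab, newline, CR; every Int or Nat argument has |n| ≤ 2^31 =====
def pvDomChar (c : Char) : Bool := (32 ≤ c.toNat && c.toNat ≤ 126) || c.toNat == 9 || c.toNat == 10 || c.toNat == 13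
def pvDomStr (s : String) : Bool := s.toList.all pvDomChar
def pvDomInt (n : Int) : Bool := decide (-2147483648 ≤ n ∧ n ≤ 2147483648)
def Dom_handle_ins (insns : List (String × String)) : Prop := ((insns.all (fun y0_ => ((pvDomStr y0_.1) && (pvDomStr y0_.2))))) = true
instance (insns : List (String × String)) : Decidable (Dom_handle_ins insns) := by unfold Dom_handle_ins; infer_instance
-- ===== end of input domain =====

-- B replaces A's per-instruction triple classification by a two-stage algorithm: first an
-- opcode frequency histogram over insns, then sums of that histogram over each keyword list.

-- ===== PORT A =====
def pvTransferIns : List String :=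
  ["mov", "movabs", "push", "xchg", "in", "out", "xlat", "pop", "lb", "lbu", "lh", "lw", "sb", "sh", "sw", "ldc", "les", "lea", "lahf", "sahf", "pushf", "popf", "lds", "restore", "lswi", "sts", "usp", "srs", "pea", "lui", "lhu", "rdcycle", "rdtime", "rdinstret"]
def pvArithmeticIns : List String :=
  ["add", "sub", "inc", "xor", "sar", "addi", "addiu", "addu", "and", "ldr", "andi", "nor", "or", "ori", "subu", "xori", "div", "divu", "mfhi", "mflo", "mthi", "mtlo", "mult", "multu", "sll", "sllv", "sra", "srav", "srl", "srlv", "bic", "xnor", "not", "eor", "asr", "fabs", "abs", "mac", "neg", "cmp", "test", "slti", "slt", "sltu", "sltui", "sltiu", "cmn", "fcmp", "dcbi", "tas", "btst", "cbw", "cwde", "cdqe", "cdq", "slli", "srli", "srai", "auipc", "adc", "sbb", "mul", "dec", "imul", "idiv", "sal"]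
def pvCallsIns : List String := ["CALL"]

-- instruction.split()[0].lower(); the [0] raises IndexError on a whitespace-only string,
-- excluded by Pre_handle_ins (the .getD "" is reached only outside Pre_).
def in_ins_list (instruction : String) (ins_list : List String) : Bool :=
  let parts := PySem.Str.split₀ instruction
  let opcode := PySem.Str.lower ((PySem.List.pyGet? parts 0).getD "")
  if ins_list.contains opcode then true else false

def handle_ins_step (acc : Int × Int × Int) (ins : String × String) : Int × Int × Int :=
  let ins_name := ins.2
  let no_transfer := if in_ins_list ins_name pvTransferIns then acc.1 + 1 else acc.1
  let no_arithmetic := if in_ins_list ins_name pvArithmeticIns then acc.2.1 + 1 else acc.2.1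
  let no_calls := if in_ins_list ins_name pvCallsIns then acc.2.2 + 1 else acc.2.2
  (no_transfer, no_arithmetic, no_calls)

def handle_ins (insns : List (String × String)) : Int × Int × Int :=
  let r := insns.foldl handle_ins_step (0, 0, 0)   -- (no_transfer, no_arithmetic, no_calls)
  (r.1, r.2.2, r.2.1)                              -- return no_transfer, no_calls, no_arithmetic

-- ===== PORT B =====
-- op = ins[1].split()[0].lower()  (the [0] raises exactly as in A; .getD "" only outside Pre_)
def pvOpcode (ins : String × String) : String :=
  PySem.Str.lower ((PySem.List.pyGet? (PySem.Str.split₀ ins.2) 0).getD "")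

-- Stage 1: freq[op] = freq.get(op, 0) + 1 over all instructions
def pvFreq (insns : List (String × String)) : PySem.Dict String Int :=
  insns.foldl (fun d ins => d.insert (pvOpcode ins) (d.getD (pvOpcode ins) 0 + 1)) PySem.Dict.empty

-- Stage 2: sum the histogram over each keyword vocabulary
def handle_ins_alt (insns : List (String × String)) : Int × Int × Int :=
  let freq := pvFreq insns
  let no_transfer := (pvTransferIns.map (fun op => freq.getD op 0)).sum
  let no_arithmetic := (pvArithmeticIns.map (fun op => freq.getD op 0)).sum
  let no_calls := freq.getD "CALL" 0
  (no_transfer, no_calls, no_arithmetic)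

-- ===== PRECONDITION & SPEC =====
-- A raises IndexError (instruction.split()[0]) when some instruction text contains no word;
-- B raises there too; Pre_ excludes exactly those inputs.
def Pre_handle_ins (insns : List (String × String)) : Prop :=
  ∀ p ∈ insns, PySem.Str.split₀ p.2 ≠ []
instance (insns : List (String × String)) : Decidable (Pre_handle_ins insns) := by unfold Pre_handle_ins; infer_instance
def pvWitness_handle_ins : (List (String × String)) := [("1", "mov eax, 1"), ("2", "CALL foo"), ("3", "add a b")]

def Spec_handle_ins (insns : List (String × String)) (out : Int × Int × Int) : Prop := out = handle_ins_alt insns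
instance (insns : List (String × String)) (out : Int × Int × Int) : Decidable (Spec_handle_ins insns out) := by unfold Spec_handle_ins; infer_instance

-- ===== CLAIM (what is proved, stated in full; the proofs are below) =====
def Claim_equal_handle_ins : Prop := ∀ (insns : List (String × String)), Dom_handle_ins insns → Pre_handle_ins insns → Spec_handle_ins insns (handle_ins insns)

-- ===== LEMMAS AND PROOFS =====

lemma in_ins_list_eq (ins : String × String) (L : List String) :
    in_ins_list ins.2 L = L.contains (pvOpcode ins) := by
  simp [in_ins_list, pvOpcode]

-- A's accumulating loop counts, per category, the opcodes whose membership test succeeds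
lemma handle_ins_loop (insns : List (String × String)) (acc : Int × Int × Int) :
    insns.foldl handle_ins_step acc =
      (acc.1 + ((insns.map pvOpcode).countP (pvTransferIns.contains ·) : Int),
       acc.2.1 + ((insns.map pvOpcode).countP (pvArithmeticIns.contains ·) : Int),
       acc.2.2 + ((insns.map pvOpcode).countP (pvCallsIns.contains ·) : Int)) := by
  induction insns generalizing acc with
  | nil => simp
  | cons ins rest ih =>
      simp only [List.foldl_cons, ih, List.map_cons, List.countP_cons]
      simp only [handle_ins_step, in_ins_list_eq]
      by_cases hT : pvTransferIns.contains (pvOpcode ins) <;>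
        by_cases hA : pvArithmeticIns.contains (pvOpcode ins) <;>
          by_cases hC : pvCallsIns.contains (pvOpcode ins) <;>
            simp only [hT, hA, hC, if_true, if_false, Bool.false_eq_true] <;>
              refine Prod.ext ?_ (Prod.ext ?_ ?_) <;> push_cast <;> ring

-- the histogram read at v is the number of occurrences of v among the opcodes
lemma pvFreq_getD (insns : List (String × String)) (v : String) :
    (pvFreq insns).getD v 0 = ((insns.map pvOpcode).count v : Int) := by
  unfold pvFreq
  have hmap : ∀ (l : List (String × String)) (d : PySem.Dict String Int),
      l.foldl (fun d ins => d.insert (pvOpcode ins) (d.getD (pvOpcode ins) 0 + 1)) d =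
        (l.map pvOpcode).foldl (fun d x => d.insert x (d.getD x 0 + 1)) d := by
    intro l
    induction l with
    | nil => intro d; rfl
    | cons x xs ih => intro d; simp [ih]
  rw [hmap]
  simpa using PySem.Dict.getD_foldl_insert_add_one (insns.map pvOpcode) PySem.Dict.empty v

-- counting a disjunction of disjoint tests splits into a sum
lemma countP_or_disjoint (x : String) (xs : List String) (hx : x ∉ xs) (ops : List String) :
    ops.countP (fun o => (o == x) || xs.contains o) =
      ops.countP (fun o => o == x) + ops.countP (fun o => xs.contains o) := by
  induction ops with
  | nil => rfl
  | cons o ops ih =>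
      simp only [List.countP_cons, ih]
      by_cases h : o = x
      · simp [h, hx]
        omega
      · simp [h]
        omega

-- summing occurrence counts over a duplicate-free vocabulary = counting membership
lemma sum_count_eq_countP (L : List String) (hL : L.Nodup) (ops : List String) :
    (L.map (fun v => ((ops.count v : Nat) : Int))).sum = ((ops.countP (L.contains ·) : Nat) : Int) := by
  induction L with
  | nil => simp
  | cons x xs ih =>
      simp only [List.map_cons, List.sum_cons, ih (List.Nodup.of_cons hL)]
      have hsplit : ops.countP ((x :: xs).contains ·) =
          ops.countP (fun o => o == x) + ops.countP (fun o => xs.contains o) := by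
        rw [← countP_or_disjoint x xs ((List.nodup_cons.mp hL).1) ops]
        apply List.countP_congr
        intro o _
        simp
      rw [hsplit]
      have hcx : ops.count x = ops.countP (fun o => o == x) := by
        simp [List.count]
      rw [hcx]
      push_cast
      ring

-- the CALL category test is just equality with "CALL"
lemma countP_calls (ops : List String) :
    ops.countP (pvCallsIns.contains ·) = ops.count "CALL" := by
  have h : ∀ o : String, (pvCallsIns.contains o) = (o == "CALL") := by
    intro o; by_cases ho : o = "CALL" <;> simp [pvCallsIns, ho]
  simp only [List.count_eq_countP, h]

-- ===== VERDICT (by name: the statement is the Claim_ definition above) =====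
theorem handle_ins_spec : Claim_equal_handle_ins := by
  intro insns _ _
  unfold Spec_handle_ins handle_ins handle_ins_alt
  rw [handle_ins_loop]
  simp only [pvFreq_getD, zero_add]
  refine Prod.ext ?_ (Prod.ext ?_ ?_)
  · exact (sum_count_eq_countP pvTransferIns (by decide) (insns.map pvOpcode)).symm
  · dsimp only
    exact_mod_cast countP_calls (insns.map pvOpcode)
  · exact (sum_count_eq_countP pvArithmeticIns (by decide) (insns.map pvOpcode)).symm
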